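-- pv_equiv track=rewrite | github.com/MaryJo-github/Algorithm | Programmers/BFS_DFS/여행경로.py | solution
-- ===== SOURCE A (Python) =====
-- from collections import defaultdict
--
-- def solution(tickets):
--     answer = []
--     adj = defaultdict(list)
--
--     for ticket in tickets:
--         adj[ticket[0]].append(ticket[1])
--
--     for key in adj.keys():
--         adj[key].sort(reverse=True)
--
--     q = ['ICN']
--     while q:
--         tmp = q[-1]
--
--         if not adj[tmp]:
--             answer.append(q.pop())
--         else:
--             q.append(adj[tmp].pop())
--     answer.reverse()
--     return answer
-- ===== SOURCE B (Python) =====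
-- def solution(tickets):
--     # One global ascending sort of the tickets replaces A's per-key reverse
--     # sorts, buckets are consumed from the front (smallest first), and a
--     # recursive Hierholzer dfs replaces A's explicit-stack while loop.
--     adj = {}
--     for t in sorted(tickets):
--         adj.setdefault(t[0], []).append(t[1])
--     route = []
--     def visit(node):
--         bucket = adj.get(node)
--         while bucket:
--             visit(bucket.pop(0))
--         route.append(node)
--     visit('ICN')
--     route.reverse()
--     return route
-- ===== Notes on version B (the rewrite author's own statement) =====
-- stated objective: alternative
-- what changed: Replaces A's per-key reverse sorts and explicit-stack while loop by one global ascending sort of the ticket list (buckets built in ascending order and consumed from the front) and a recursive Hierholzer dfs.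
import Mathlib
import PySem

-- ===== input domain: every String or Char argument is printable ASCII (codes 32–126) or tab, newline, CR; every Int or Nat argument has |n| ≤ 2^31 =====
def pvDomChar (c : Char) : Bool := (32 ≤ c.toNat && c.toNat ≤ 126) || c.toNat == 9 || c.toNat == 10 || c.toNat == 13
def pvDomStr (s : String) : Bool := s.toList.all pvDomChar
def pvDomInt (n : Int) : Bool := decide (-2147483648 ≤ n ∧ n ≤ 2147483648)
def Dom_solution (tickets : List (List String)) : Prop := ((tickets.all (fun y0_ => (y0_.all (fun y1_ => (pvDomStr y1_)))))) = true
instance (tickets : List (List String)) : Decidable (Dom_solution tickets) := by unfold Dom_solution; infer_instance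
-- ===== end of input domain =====

-- B replaces A's per-key reverse sorts by ONE ascending sort of the whole ticket
-- list (buckets then come out ascending and are consumed from the FRONT), and
-- replaces A's explicit-stack while loop by a recursive Hierholzer dfs
-- (alternative decomposition, no speed claim).

-- ===== PORT A =====
-- adj[ticket[0]].append(ticket[1]) over all tickets (a ticket shorter than 2 raises
-- IndexError in Python and is outside Pre_; the port skips it).
def buildAdj (tickets : List (List String)) : PySem.Dict String (List String) :=
  tickets.foldl (fun adj t =>
    match t with
    | src :: dst :: _ => adj.insert src (adj.getD src [] ++ [dst])
    | _ => adj) PySem.Dict.empty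

-- for key in adj.keys(): adj[key].sort(reverse=True)
def sortAdj (adj : PySem.Dict String (List String)) : PySem.Dict String (List String) :=
  adj.keys.foldl (fun d k => d.insert k (PySem.List.sorted (d.getD k []) (fun x => x) true)) adj

-- the while-q loop; q is kept head-is-top (Python appends/pops at the right end),
-- adj[tmp] of a defaultdict is getD tmp [] (the key it silently adds is never read).
-- The fuel argument is only a termination guard: each iteration strictly decreases
-- 2*(tickets left in adj)+|q|, so the 2*|tickets|+2 passed below provably suffices.
def loopA : Nat → PySem.Dict String (List String) → List String → List String → List String
  | 0, _, _, answer => answer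
  | fuel+1, adj, q, answer =>
    match q with
    | [] => answer
    | tmp :: rest =>
      match (adj.getD tmp []).getLast? with
      | none => loopA fuel adj rest (answer ++ [tmp])           -- answer.append(q.pop())
      | some x => loopA fuel (adj.insert tmp (adj.getD tmp []).dropLast) (x :: tmp :: rest) answer

def solution (tickets : List (List String)) : List String :=
  (loopA (2 * tickets.length + 2) (sortAdj (buildAdj tickets)) ["ICN"] []).reverse

-- ===== PORT B =====
-- for t in sorted(tickets): adj.setdefault(t[0], []).append(t[1])
-- (sorted(tickets) compares List String lexicographically, exactly Python's list<)
def buildB (tickets : List (List String)) : PySem.Dict String (List String) :=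
  (PySem.List.sorted tickets (fun t => t) false).foldl (fun adj t =>
    match t with
    | src :: dst :: _ => adj.insert src (adj.getD src [] ++ [dst])
    | _ => adj) PySem.Dict.empty

-- def visit(node): bucket = adj.get(node); while bucket: visit(bucket.pop(0)); route.append(node)
-- returns (updated adj, the appends this call makes, in append order); the fuel
-- argument is only a termination guard: every loop iteration consumes one ticket,
-- so the |tickets|+1 passed below provably suffices.
def dfsB : Nat → PySem.Dict String (List String) → String →
    PySem.Dict String (List String) × List String
  | 0, adj, node => (adj, [node])
  | fuel+1, adj, node =>
    match adj.getD node [] with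
    | [] => (adj, [node])                                       -- route.append(node)
    | x :: rest =>
      let r1 := dfsB fuel (adj.insert node rest) x              -- visit(bucket.pop(0))
      let r2 := dfsB fuel r1.1 node                             -- re-test the while condition
      (r2.1, r1.2 ++ r2.2)

def solution_alt (tickets : List (List String)) : List String :=
  ((dfsB (tickets.length + 1) (buildB tickets) "ICN").2).reverse

-- ===== PRECONDITION & SPEC =====
-- Pre_ excludes exactly the inputs where Python A raises IndexError:
-- a ticket with fewer than two entries (ticket[0] / ticket[1]).
def Pre_solution (tickets : List (List String)) : Prop :=
  ∀ t ∈ tickets, 2 ≤ t.length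
instance (tickets : List (List String)) : Decidable (Pre_solution tickets) := by
  unfold Pre_solution; infer_instance

def pvWitness_solution : List (List String) :=
  [["ICN", "AAA"], ["AAA", "ICN"], ["ICN", "BBB"]]

def Spec_solution (tickets : List (List String)) (out : List String) : Prop := out = solution_alt tickets
instance (tickets : List (List String)) (out : List String) : Decidable (Spec_solution tickets out) := by unfold Spec_solution; infer_instance

-- ===== CLAIM (what is proved, stated in full; the proofs are below) =====
def Claim_equal_solution : Prop := ∀ (tickets : List (List String)), Dom_solution tickets → Pre_solution tickets → Spec_solution tickets (solution tickets)

-- ===== LEMMAS AND PROOFS =====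

-- the destination of a ticket leaving k, if it is one
def pick (k : String) : List String -> Option String
  | s :: d :: _ => if s == k then some d else none
  | _ => none

-- destinations of the tickets leaving k, in list order
def dsts (k : String) (ts : List (List String)) : List String :=
  ts.filterMap (pick k)

-- proof-side recursive mirror of A's stack loop (pop from the BACK of the bucket)
def dfsA : Nat → PySem.Dict String (List String) → String →
    PySem.Dict String (List String) × List String
  | 0, adj, node => (adj, [node])
  | fuel+1, adj, node =>
    match (adj.getD node []).getLast? with
    | none => (adj, [node])
    | some x =>
      let r1 := dfsA fuel (adj.insert node (adj.getD node []).dropLast) x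
      let r2 := dfsA fuel r1.1 node
      (r2.1, r1.2 ++ r2.2)

-- total number of tickets still stored in the adjacency dict
def sizeD (d : PySem.Dict String (List String)) : Nat :=
  (d.items.map (fun p => p.2.length)).sum

theorem getSomeD (d : PySem.Dict String (List String)) (k : String)
    (h : d.getD k [] ≠ []) : d.get? k = some (d.getD k []) := by
  rw [PySem.Dict.getD_eq_get?_getD] at *
  cases hg : d.get? k with
  | none => simp [hg] at h
  | some l => simp

theorem lenLe (d : PySem.Dict String (List String)) (k : String) (l : List String)
    (h : d.get? k = some l) : l.length ≤ sizeD d := by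
  have hm := PySem.Dict.mem_items_of_get?_eq_some d h
  unfold sizeD
  exact List.le_sum_of_mem (List.mem_map_of_mem hm)

theorem sum_map_replace (ps : List (String × List String)) (k : String) (l w : List String)
    (hmem : (k, l) ∈ ps) (hnd : (ps.map Prod.fst).Nodup) :
    ((ps.map (fun p => if p.1 == k then (k, w) else p)).map (fun p => p.2.length)).sum + l.length
      = (ps.map (fun p => p.2.length)).sum + w.length := by
  induction ps with
  | nil => simp at hmem
  | cons p ps ih =>
    simp only [List.map_cons, List.nodup_cons] at hnd ⊢
    rcases List.mem_cons.1 hmem with h1 | h1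
    · subst h1
      simp only [beq_self_eq_true, if_pos]
      have hps : ps.map (fun p => if p.1 == k then (k, w) else p) = ps := by
        conv_rhs => rw [← List.map_id ps]
        apply List.map_congr_left
        intro q hq
        have : q.1 ≠ k := by
          intro hk
          have hmm : q.1 ∈ ps.map Prod.fst := List.mem_map_of_mem (f := Prod.fst) hq
          rw [hk] at hmm
          exact hnd.1 hmm
        simp [this]
      rw [hps]
      simp [List.sum_cons]; omega
    · have hne : p.1 ≠ k := by
        intro hk
        exact hnd.1 (hk ▸ (List.mem_map_of_mem (f := Prod.fst) h1 : k ∈ ps.map Prod.fst))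
      rw [if_neg (by simpa using hne)]
      simp only [List.sum_cons]
      have := ih h1 hnd.2
      omega

theorem sizeD_insert_mem (d : PySem.Dict String (List String)) (k : String) (l w : List String)
    (h : d.get? k = some l) (hnd : d.keys.Nodup) :
    sizeD (d.insert k w) + l.length = sizeD d + w.length := by
  have hc : d.contains k = true := by
    rw [PySem.Dict.contains_eq_isSome_get?, h]; rfl
  have hm := PySem.Dict.mem_items_of_get?_eq_some d h
  unfold sizeD
  rw [PySem.Dict.items_insert_of_contains d w hc]
  exact sum_map_replace d.items k l w hm (by simpa [PySem.Dict.keys] using hnd)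

theorem sizeD_insert_new (d : PySem.Dict String (List String)) (k : String) (w : List String)
    (h : d.contains k = false) :
    sizeD (d.insert k w) = sizeD d + w.length := by
  unfold sizeD
  rw [PySem.Dict.items_insert_of_not_contains d w h]
  simp

-- basic fact: a popped bucket strictly shrinks sizeD by one
theorem sizeD_pop (adj : PySem.Dict String (List String)) (tmp x : String)
    (hnd : adj.keys.Nodup) (hx : (adj.getD tmp []).getLast? = some x) :
    sizeD (adj.insert tmp (adj.getD tmp []).dropLast) + 1 = sizeD adj := by
  have hne : adj.getD tmp [] ≠ [] := by
    intro h0; rw [h0] at hx; simp at hx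
  have hg := getSomeD adj tmp hne
  have := sizeD_insert_mem adj tmp (adj.getD tmp []) ((adj.getD tmp []).dropLast) hg hnd
  have hlen : (adj.getD tmp []).dropLast.length + 1 = (adj.getD tmp []).length := by
    have : (adj.getD tmp []).dropLast.length = (adj.getD tmp []).length - 1 := List.length_dropLast
    have hpos : 0 < (adj.getD tmp []).length := List.length_pos_of_ne_nil hne
    omega
  omega

-- buildAdj: keys nodup and sizeD bounded by number of tickets
theorem build_inv (tickets : List (List String)) (d : PySem.Dict String (List String))
    (hnd : d.keys.Nodup) :
    (tickets.foldl (fun adj t =>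
      match t with
      | src :: dst :: _ => adj.insert src (adj.getD src [] ++ [dst])
      | _ => adj) d).keys.Nodup ∧
    sizeD (tickets.foldl (fun adj t =>
      match t with
      | src :: dst :: _ => adj.insert src (adj.getD src [] ++ [dst])
      | _ => adj) d) ≤ sizeD d + tickets.length := by
  induction tickets generalizing d with
  | nil => exact ⟨hnd, by simp⟩
  | cons t ts ih =>
    simp only [List.foldl_cons]
    match t with
    | [] => exact ⟨(ih d hnd).1, by have := (ih d hnd).2; simp at *; omega⟩
    | [s] => exact ⟨(ih d hnd).1, by have := (ih d hnd).2; simp at *; omega⟩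
    | src :: dst :: r =>
      have hnd' := PySem.Dict.nodup_keys_insert d src (d.getD src [] ++ [dst]) hnd
      have hstep : sizeD (d.insert src (d.getD src [] ++ [dst])) ≤ sizeD d + 1 := by
        cases hc : d.contains src with
        | false =>
          rw [sizeD_insert_new d src _ hc, PySem.Dict.getD_of_not_contains d [] hc]
          simp
        | true =>
          have hg : d.get? src = some (d.getD src []) := by
            rw [PySem.Dict.contains_eq_isSome_get?] at hc
            cases hgg : d.get? src with
            | none => rw [hgg] at hc; simp at hc
            | some l => rw [PySem.Dict.getD_eq_get?_getD, hgg]; rfl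
          have := sizeD_insert_mem d src (d.getD src []) (d.getD src [] ++ [dst]) hg hnd
          simp at this; omega
      have h := ih (d.insert src (d.getD src [] ++ [dst])) hnd'
      exact ⟨h.1, by simp at *; omega⟩

-- sortAdj fold: keys nodup preserved, sizeD does not grow
theorem sort_inv (ks : List String) (d : PySem.Dict String (List String))
    (hnd : d.keys.Nodup) :
    (ks.foldl (fun d k => d.insert k (PySem.List.sorted (d.getD k []) (fun x => x) true)) d).keys.Nodup ∧
    sizeD (ks.foldl (fun d k => d.insert k (PySem.List.sorted (d.getD k []) (fun x => x) true)) d) ≤ sizeD d := by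
  induction ks generalizing d with
  | nil => exact ⟨hnd, le_refl _⟩
  | cons k ks ih =>
    simp only [List.foldl_cons]
    have hnd' := PySem.Dict.nodup_keys_insert d k (PySem.List.sorted (d.getD k []) (fun x => x) true) hnd
    have hstep : sizeD (d.insert k (PySem.List.sorted (d.getD k []) (fun x => x) true)) ≤ sizeD d := by
      cases hc : d.contains k with
      | false =>
        rw [sizeD_insert_new d k _ hc, PySem.Dict.getD_of_not_contains d [] hc]
        simp [PySem.List.length_sorted]
      | true =>
        have hg : d.get? k = some (d.getD k []) := by
          rw [PySem.Dict.contains_eq_isSome_get?] at hc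
          cases hgg : d.get? k with
          | none => rw [hgg] at hc; simp at hc
          | some l => rw [PySem.Dict.getD_eq_get?_getD, hgg]; rfl
        have := sizeD_insert_mem d k (d.getD k []) (PySem.List.sorted (d.getD k []) (fun x => x) true) hg hnd
        rw [PySem.List.length_sorted] at this
        omega
    have h := ih _ hnd'
    exact ⟨h.1, le_trans h.2 hstep⟩

theorem loopA_nil (f : Nat) (adj : PySem.Dict String (List String)) (ans : List String) :
    loopA f adj [] ans = ans := by
  cases f <;> rfl

theorem loopA_succ_none (f : Nat) (adj : PySem.Dict String (List String))
    (tmp : String) (rest ans : List String) (hx : (adj.getD tmp []).getLast? = none) :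
    loopA (f + 1) adj (tmp :: rest) ans = loopA f adj rest (ans ++ [tmp]) := by
  simp only [loopA, hx]

theorem loopA_succ_some (f : Nat) (adj : PySem.Dict String (List String))
    (tmp x : String) (rest ans : List String) (hx : (adj.getD tmp []).getLast? = some x) :
    loopA (f + 1) adj (tmp :: rest) ans
      = loopA f (adj.insert tmp (adj.getD tmp []).dropLast) (x :: tmp :: rest) ans := by
  simp only [loopA, hx]

theorem dfsA_succ_none (f : Nat) (adj : PySem.Dict String (List String))
    (node : String) (hx : (adj.getD node []).getLast? = none) :
    dfsA (f + 1) adj node = (adj, [node]) := by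
  simp only [dfsA, hx]

theorem dfsA_succ_some (f : Nat) (adj : PySem.Dict String (List String))
    (node x : String) (hx : (adj.getD node []).getLast? = some x) :
    dfsA (f + 1) adj node
      = ((dfsA f (dfsA f (adj.insert node (adj.getD node []).dropLast) x).1 node).1,
         (dfsA f (adj.insert node (adj.getD node []).dropLast) x).2
           ++ (dfsA f (dfsA f (adj.insert node (adj.getD node []).dropLast) x).1 node).2) := by
  simp only [dfsA, hx]

theorem getPos (adj : PySem.Dict String (List String)) (tmp x : String)
    (hx : (adj.getD tmp []).getLast? = some x) : 1 ≤ sizeD adj := by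
  have hne : adj.getD tmp [] ≠ [] := by intro h0; rw [h0] at hx; simp at hx
  have := lenLe adj tmp _ (getSomeD adj tmp hne)
  have hpos : 0 < (adj.getD tmp []).length := List.length_pos_of_ne_nil hne
  omega

theorem loopA_canon (f : Nat) : ∀ (adj : PySem.Dict String (List String)) (q ans : List String),
    adj.keys.Nodup → 2 * sizeD adj + q.length ≤ f →
    loopA f adj q ans = loopA (2 * sizeD adj + q.length) adj q ans := by
  induction f using Nat.strong_induction_on with
  | _ f ih =>
    intro adj q ans hnd hb
    match q with
    | [] => rw [loopA_nil, loopA_nil]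
    | tmp :: rest =>
      match f with
      | 0 => simp at hb
      | g + 1 =>
        have hmu : 2 * sizeD adj + (tmp :: rest).length = (2 * sizeD adj + rest.length) + 1 := by
          simp; omega
        rw [hmu]
        cases hx : (adj.getD tmp []).getLast? with
        | none =>
          rw [loopA_succ_none g adj tmp rest ans hx,
              loopA_succ_none (2 * sizeD adj + rest.length) adj tmp rest ans hx]
          have h1 : 2 * sizeD adj + rest.length ≤ g := by simp at hb; omega
          rw [ih g (by omega) adj rest (ans ++ [tmp]) hnd h1]
        | some x =>
          rw [loopA_succ_some g adj tmp x rest ans hx,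
              loopA_succ_some (2 * sizeD adj + rest.length) adj tmp x rest ans hx]
          have hpop := sizeD_pop adj tmp x hnd hx
          have hnd1 := PySem.Dict.nodup_keys_insert adj tmp ((adj.getD tmp []).dropLast) hnd
          have h1 : 2 * sizeD (adj.insert tmp (adj.getD tmp []).dropLast) + (x :: tmp :: rest).length ≤ g := by
            simp at hb ⊢; omega
          rw [ih g (by omega) _ (x :: tmp :: rest) ans hnd1 h1]
          rw [ih (2 * sizeD adj + rest.length) (by omega) _ (x :: tmp :: rest) ans hnd1 (by simp; omega)]

theorem dfsA_inv (f : Nat) : ∀ (adj : PySem.Dict String (List String)) (node : String),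
    adj.keys.Nodup →
    (dfsA f adj node).1.keys.Nodup ∧ sizeD (dfsA f adj node).1 ≤ sizeD adj := by
  induction f with
  | zero => intro adj node hnd; exact ⟨hnd, le_refl _⟩
  | succ g ih =>
    intro adj node hnd
    cases hx : (adj.getD node []).getLast? with
    | none => rw [dfsA_succ_none g adj node hx]; exact ⟨hnd, le_refl _⟩
    | some x =>
      rw [dfsA_succ_some g adj node x hx]
      have hpop := sizeD_pop adj node x hnd hx
      have hnd1 := PySem.Dict.nodup_keys_insert adj node ((adj.getD node []).dropLast) hnd
      have h1 := ih (adj.insert node (adj.getD node []).dropLast) x hnd1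
      have h2 := ih (dfsA g (adj.insert node (adj.getD node []).dropLast) x).1 node h1.1
      refine ⟨h2.1, ?_⟩
      show sizeD (dfsA g (dfsA g (adj.insert node (adj.getD node []).dropLast) x).1 node).1 ≤ sizeD adj
      omega

theorem dfsA_canon (f : Nat) : ∀ (adj : PySem.Dict String (List String)) (node : String),
    adj.keys.Nodup → sizeD adj + 1 ≤ f →
    dfsA f adj node = dfsA (sizeD adj + 1) adj node := by
  induction f using Nat.strong_induction_on with
  | _ f ih =>
    intro adj node hnd hb
    match f with
    | 0 => omega
    | g + 1 =>
      cases hx : (adj.getD node []).getLast? with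
      | none => rw [dfsA_succ_none g adj node hx, dfsA_succ_none (sizeD adj) adj node hx]
      | some x =>
        rw [dfsA_succ_some g adj node x hx, dfsA_succ_some (sizeD adj) adj node x hx]
        have hpop := sizeD_pop adj node x hnd hx
        have hpos := getPos adj node x hx
        have hnd1 := PySem.Dict.nodup_keys_insert adj node ((adj.getD node []).dropLast) hnd
        have e1 : dfsA g (adj.insert node (adj.getD node []).dropLast) x
            = dfsA (sizeD adj) (adj.insert node (adj.getD node []).dropLast) x := by
          rw [ih g (by omega) _ x hnd1 (by omega),
              ih (sizeD adj) (by omega) _ x hnd1 (by omega)]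
        rw [e1]
        have hinv := dfsA_inv (sizeD adj) (adj.insert node (adj.getD node []).dropLast) x hnd1
        have e2 : dfsA g (dfsA (sizeD adj) (adj.insert node (adj.getD node []).dropLast) x).1 node
            = dfsA (sizeD adj) (dfsA (sizeD adj) (adj.insert node (adj.getD node []).dropLast) x).1 node := by
          rw [ih g (by omega) _ node hinv.1 (by omega),
              ih (sizeD adj) (by omega) _ node hinv.1 (by omega)]
        rw [e2]

theorem main_sim (n : Nat) : ∀ (adj : PySem.Dict String (List String)) (node : String)
    (rest ans : List String), adj.keys.Nodup → sizeD adj ≤ n →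
    loopA (2 * sizeD adj + rest.length + 1) adj (node :: rest) ans
      = loopA (2 * sizeD (dfsA (sizeD adj + 1) adj node).1 + rest.length)
          (dfsA (sizeD adj + 1) adj node).1 rest (ans ++ (dfsA (sizeD adj + 1) adj node).2) := by
  induction n with
  | zero =>
    intro adj node rest ans hnd hs
    cases hx : (adj.getD node []).getLast? with
    | none =>
      rw [dfsA_succ_none (sizeD adj) adj node hx,
          loopA_succ_none (2 * sizeD adj + rest.length) adj node rest ans hx]
    | some x => exact absurd (getPos adj node x hx) (by omega)
  | succ m ih =>
    intro adj node rest ans hnd hs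
    cases hx : (adj.getD node []).getLast? with
    | none =>
      rw [dfsA_succ_none (sizeD adj) adj node hx,
          loopA_succ_none (2 * sizeD adj + rest.length) adj node rest ans hx]
    | some x =>
      have hpop := sizeD_pop adj node x hnd hx
      have hpos := getPos adj node x hx
      have hnd1 := PySem.Dict.nodup_keys_insert adj node ((adj.getD node []).dropLast) hnd
      rw [loopA_succ_some (2 * sizeD adj + rest.length) adj node x rest ans hx]
      set adj1 := adj.insert node (adj.getD node []).dropLast with hadj1
      have hf1 : 2 * sizeD adj + rest.length = 2 * sizeD adj1 + (node :: rest).length + 1 := by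
        simp; omega
      rw [hf1, ih adj1 x (node :: rest) ans hnd1 (by omega)]
      set r1 := dfsA (sizeD adj1 + 1) adj1 x with hr1
      have hinv1 := dfsA_inv (sizeD adj1 + 1) adj1 x hnd1
      rw [← hr1] at hinv1
      have hf2 : 2 * sizeD r1.1 + (node :: rest).length = 2 * sizeD r1.1 + rest.length + 1 := by
        simp; omega
      rw [hf2, ih r1.1 node rest (ans ++ r1.2) hinv1.1 (by omega)]
      set r2 := dfsA (sizeD r1.1 + 1) r1.1 node with hr2
      have hrhs : dfsA (sizeD adj + 1) adj node = (r2.1, r1.2 ++ r2.2) := by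
        rw [dfsA_succ_some (sizeD adj) adj node x hx, ← hadj1]
        have h1 : dfsA (sizeD adj) adj1 x = r1 := by
          rw [hr1, dfsA_canon (sizeD adj) adj1 x hnd1 (by omega)]
        rw [h1]
        have h2 : dfsA (sizeD adj) r1.1 node = r2 := by
          rw [hr2]
          exact dfsA_canon (sizeD adj) r1.1 node hinv1.1 (by omega)
        rw [h2]
      rw [hrhs]
      simp [List.append_assoc]

-- ===== relating the two preprocessed dictionaries =====

-- BucketRel d1 d2: every bucket of A's dict is the reverse of B's bucket
def BucketRel (d1 d2 : PySem.Dict String (List String)) : Prop :=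
  ∀ k, d1.getD k [] = (d2.getD k []).reverse

-- the build fold appends, per key, exactly the destinations of that key's tickets
theorem build_getD (ts : List (List String)) :
    ∀ (d : PySem.Dict String (List String)) (k : String),
    (ts.foldl (fun adj t =>
      match t with
      | src :: dst :: _ => adj.insert src (adj.getD src [] ++ [dst])
      | _ => adj) d).getD k [] = d.getD k [] ++ dsts k ts := by
  induction ts with
  | nil => intro d k; simp [dsts]
  | cons t ts ih =>
    intro d k
    simp only [List.foldl_cons]
    match t with
    | [] => rw [ih]; simp [dsts, pick]
    | [s] => rw [ih]; simp [dsts, pick]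
    | src :: dst :: r =>
      rw [ih]
      by_cases hk : src = k
      · subst hk
        rw [PySem.Dict.getD_insert_self]
        simp [dsts, pick]
      · rw [PySem.Dict.getD_insert, if_neg (Ne.symm hk)]
        simp [dsts, pick, hk]

-- the sort pass sorts each existing bucket descending and touches nothing else
theorem sort_getD (ks : List String) :
    ∀ (d : PySem.Dict String (List String)) (k : String), ks.Nodup →
    (ks.foldl (fun d k => d.insert k (PySem.List.sorted (d.getD k []) (fun x => x) true)) d).getD k []
      = if k ∈ ks then PySem.List.sorted (d.getD k []) (fun x => x) true else d.getD k [] := by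
  induction ks with
  | nil => intro d k _; simp
  | cons k' ks ih =>
    intro d k hnd
    simp only [List.foldl_cons]
    rw [ih _ _ hnd.of_cons]
    by_cases hk : k = k'
    · subst hk
      have : k ∉ ks := (List.nodup_cons.1 hnd).1
      simp [this, PySem.Dict.getD_insert_self]
    · rw [PySem.Dict.getD_insert, if_neg hk]
      simp [List.mem_cons, hk]

-- the PORT's sorted (default List-lex instances) equals the LinearOrder-instance sorted
theorem sorted_bridge (xs : List (List String)) :
    PySem.List.sorted xs (fun t => t) false
      = @PySem.List.sorted (List String) (List String)
          (@Preorder.toLT _ (@PartialOrder.toPreorder _ (@LinearOrder.toPartialOrder _ List.instLinearOrder)))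
          (@LinearOrder.toDecidableLT _ List.instLinearOrder) xs (fun t => t) false := by
  rw [PySem.List.sorted_eq_foldl_insertBy,
      @PySem.List.sorted_eq_foldl_insertBy (List String) (List String)
        (@Preorder.toLT _ (@PartialOrder.toPreorder _ (@LinearOrder.toPartialOrder _ List.instLinearOrder)))
        (@LinearOrder.toDecidableLT _ List.instLinearOrder) xs (fun t => t)]
  have hfun : (fun (a b : List String) => decide (a < b))
      = (fun (a b : List String) => @decide _ (@LinearOrder.toDecidableLT _ List.instLinearOrder a b)) := by
    funext a b
    exact decide_eq_decide.mpr ((List.lt_iff_lex_lt a b).trans Iff.rfl)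
  rw [hfun]

theorem sortedTicketsAsc_pairwise (xs : List (List String)) :
    (PySem.List.sorted xs (fun t => t) false).Pairwise (fun a b => a ≤ b) := by
  rw [sorted_bridge]
  exact PySem.List.sorted_pairwise xs (fun t => t)

-- A's preprocessed bucket at k is sorted-descending dsts
theorem Aside (ts : List (List String)) (k : String) :
    (sortAdj (buildAdj ts)).getD k [] = PySem.List.sorted (dsts k ts) (fun x => x) true := by
  have hb : (buildAdj ts).getD k [] = dsts k ts := by
    unfold buildAdj
    rw [build_getD]
    simp
  have hnd := (build_inv ts PySem.Dict.empty (by simp)).1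
  unfold sortAdj
  rw [sort_getD _ _ _ (by exact hnd)]
  by_cases hm : k ∈ (buildAdj ts).keys
  · simp [hm, hb]
  · have hc : (buildAdj ts).contains k = false := by
      rw [← Bool.not_eq_true, PySem.Dict.contains_iff_mem_keys]
      · exact hm
    have h0 : (buildAdj ts).getD k [] = [] := PySem.Dict.getD_of_not_contains _ _ hc
    have h0' : dsts k ts = [] := by rw [← hb, h0]
    rw [if_neg hm, h0, h0']
    rfl

-- filterMap of the ascending ticket sort gives ascending destinations
theorem Bside_pairwise (ts : List (List String)) (k : String) :
    (dsts k (PySem.List.sorted ts (fun t => t) false)).Pairwise (fun a b => a ≤ b) := by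
  unfold dsts
  rw [List.pairwise_filterMap]
  refine (sortedTicketsAsc_pairwise ts).imp ?_
  intro a b hab x hx y hy
  match a, b, hab, hx, hy with
  | [], _, _, hx, _ => simp [pick] at hx
  | [sa], _, _, hx, _ => simp [pick] at hx
  | _ :: _ :: _, [], _, _, hy => simp [pick] at hy
  | _ :: _ :: _, [sb], _, _, hy => simp [pick] at hy
  | sa :: da :: ra, sb :: db :: rb, hab, hx, hy =>
    simp only [pick] at hx hy
    by_cases hsa : sa == k
    · by_cases hsb : sb == k
      · simp only [hsa, if_pos] at hx
        simp only [hsb, if_pos] at hy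
        cases hx; cases hy
        have hka : sa = k := by simpa using hsa
        have hkb : sb = k := by simpa using hsb
        subst hka; subst hkb
        rcases lt_or_eq_of_le hab with h | h
        · rw [List.cons_lt_cons_iff] at h
          rcases h with h | ⟨_, h⟩
          · exact absurd h (lt_irrefl _)
          · rw [List.cons_lt_cons_iff] at h
            rcases h with h | ⟨h, _⟩
            · exact le_of_lt h
            · exact le_of_eq h
        · cases h; exact le_refl _
      · simp [hsb] at hy
    · simp [hsa] at hx

-- B's bucket at k is the reverse of A's
theorem dsts_sorted (ts : List (List String)) (k : String) :
    dsts k (PySem.List.sorted ts (fun t => t) false)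
      = (PySem.List.sorted (dsts k ts) (fun x => x) true).reverse := by
  have hperm : (dsts k (PySem.List.sorted ts (fun t => t) false)).Perm (dsts k ts) :=
    (PySem.List.sorted_perm ts (fun t => t) false).filterMap _
  have h1 : (PySem.List.sorted (dsts k ts) (fun x => x) true).Pairwise (fun a b : String => b ≤ a) :=
    PySem.List.sorted_pairwise_rev (dsts k ts) (fun x => x)
  have h2 : (dsts k (PySem.List.sorted ts (fun t => t) false)).reverse.Pairwise (fun a b : String => b ≤ a) := by
    rw [List.pairwise_reverse]
    exact Bside_pairwise ts k
  have hp2 : (PySem.List.sorted (dsts k ts) (fun x => x) true).Perm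
      (dsts k (PySem.List.sorted ts (fun t => t) false)).reverse := by
    refine ((PySem.List.sorted_perm (dsts k ts) (fun x => x) true).trans hperm.symm).trans ?_
    exact (List.reverse_perm _).symm
  have := hp2.eq_of_pairwise (fun a b _ _ hab hba => le_antisymm hba hab) h1 h2
  rw [this, List.reverse_reverse]

theorem pre_Rel (ts : List (List String)) : BucketRel (sortAdj (buildAdj ts)) (buildB ts) := by
  intro k
  have hb : (buildB ts).getD k [] = dsts k (PySem.List.sorted ts (fun t => t) false) := by
    unfold buildB
    rw [build_getD]
    simp
  rw [Aside, hb, dsts_sorted, List.reverse_reverse]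

theorem dfsB_succ_nil (f : Nat) (d : PySem.Dict String (List String)) (node : String)
    (h : d.getD node [] = []) : dfsB (f + 1) d node = (d, [node]) := by
  simp only [dfsB, h]

theorem dfsB_succ_cons (f : Nat) (d : PySem.Dict String (List String)) (node x : String)
    (rest : List String) (h : d.getD node [] = x :: rest) :
    dfsB (f + 1) d node
      = ((dfsB f (dfsB f (d.insert node rest) x).1 node).1,
         (dfsB f (d.insert node rest) x).2 ++ (dfsB f (dfsB f (d.insert node rest) x).1 node).2) := by
  simp only [dfsB, h]

-- the two dfs recursions run in lock-step under BucketRel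
theorem dfs_sim (f : Nat) : ∀ (d1 d2 : PySem.Dict String (List String)) (node : String),
    BucketRel d1 d2 →
    (dfsA f d1 node).2 = (dfsB f d2 node).2 ∧ BucketRel (dfsA f d1 node).1 (dfsB f d2 node).1 := by
  induction f with
  | zero => intro d1 d2 node hR; exact ⟨rfl, hR⟩
  | succ g ih =>
    intro d1 d2 node hR
    have hk := hR node
    cases h2 : d2.getD node [] with
    | nil =>
      have h1 : (d1.getD node []).getLast? = none := by
        rw [hk, h2]; simp
      rw [dfsA_succ_none g d1 node h1, dfsB_succ_nil g d2 node h2]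
      exact ⟨rfl, hR⟩
    | cons x rest =>
      have h1 : (d1.getD node []).getLast? = some x := by
        rw [hk, h2, List.getLast?_reverse]; rfl
      rw [dfsA_succ_some g d1 node x h1, dfsB_succ_cons g d2 node x rest h2]
      have hR1 : BucketRel (d1.insert node (d1.getD node []).dropLast) (d2.insert node rest) := by
        intro j
        by_cases hj : j = node
        · subst hj
          rw [PySem.Dict.getD_insert_self, PySem.Dict.getD_insert_self, hk, h2]
          rw [List.dropLast_reverse]
          rfl
        · rw [PySem.Dict.getD_insert, if_neg hj, PySem.Dict.getD_insert, if_neg hj]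
          exact hR j
      have hA := ih _ _ x hR1
      have hB := ih (dfsA g (d1.insert node (d1.getD node []).dropLast) x).1
        (dfsB g (d2.insert node rest) x).1 node hA.2
      exact ⟨by rw [hA.1, hB.1], hB.2⟩

theorem final (tickets : List (List String)) : solution tickets = solution_alt tickets := by
  have hb := build_inv tickets PySem.Dict.empty (by simp)
  have hbn : (buildAdj tickets).keys.Nodup := by unfold buildAdj; exact hb.1
  have hbs : sizeD (buildAdj tickets) ≤ tickets.length := by
    have h2 := hb.2
    have h0 : sizeD PySem.Dict.empty = 0 := rfl
    unfold buildAdj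
    omega
  have hsort := sort_inv (buildAdj tickets).keys (buildAdj tickets) hbn
  have hnd : (sortAdj (buildAdj tickets)).keys.Nodup := by unfold sortAdj; exact hsort.1
  have hsz : sizeD (sortAdj (buildAdj tickets)) ≤ tickets.length := by
    have h2 := hsort.2
    unfold sortAdj
    omega
  unfold solution solution_alt
  rw [loopA_canon (2 * tickets.length + 2) (sortAdj (buildAdj tickets)) ["ICN"] [] hnd (by simp; omega)]
  have hlen : 2 * sizeD (sortAdj (buildAdj tickets)) + (["ICN"] : List String).length
      = 2 * sizeD (sortAdj (buildAdj tickets)) + ([] : List String).length + 1 := by simp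
  rw [hlen, main_sim (sizeD (sortAdj (buildAdj tickets))) (sortAdj (buildAdj tickets)) "ICN" [] [] hnd le_rfl,
      loopA_nil, List.nil_append,
      ← dfsA_canon (tickets.length + 1) (sortAdj (buildAdj tickets)) "ICN" hnd (by omega)]
  rw [(dfs_sim (tickets.length + 1) (sortAdj (buildAdj tickets)) (buildB tickets) "ICN" (pre_Rel tickets)).1]

-- ===== VERDICT (by name: the statement is the Claim_ definition above) =====
theorem solution_spec : Claim_equal_solution := by
  intro tickets _ _
  unfold Spec_solution
  exact final tickets
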